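-- pv_equiv track=rewrite | github.com/sterance/relic-info-extractor | gui.py | has_single_word_difference
-- ===== SOURCE A (Python) =====
-- def has_single_word_difference(shorter, longer):
--     """Check if longer has at most one extra word compared to shorter"""
--     if len(longer) != len(shorter) + 1:
--         return False
--
--     # Check if shorter is contained in longer with one word inserted
--     i = j = 0
--     extra_words = 0
--
--     while i < len(shorter) and j < len(longer):
--         if shorter[i] == longer[j]:
--             i += 1
--             j += 1
--         else:
--             j += 1
--             extra_words += 1
--             if extra_words > 1:
--                 return False
--
--     return i == len(shorter) and extra_words <= 1
-- ===== SOURCE B (Python) =====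
-- def has_single_word_difference(shorter, longer):
--     """Check if longer has at most one extra word compared to shorter"""
--     if len(longer) != len(shorter) + 1:
--         return False
--     for k in range(len(shorter)):
--         if shorter[k] != longer[k]:
--             return shorter[k:] == longer[k + 1:]
--     return True
-- ===== Notes on version B (the rewrite author's own statement) =====
-- stated objective: simpler
-- what changed: Replaces the two-pointer walk with an extra_words counter by a find-first-divergence loop followed by a single suffix slice comparison.
import Mathlib
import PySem

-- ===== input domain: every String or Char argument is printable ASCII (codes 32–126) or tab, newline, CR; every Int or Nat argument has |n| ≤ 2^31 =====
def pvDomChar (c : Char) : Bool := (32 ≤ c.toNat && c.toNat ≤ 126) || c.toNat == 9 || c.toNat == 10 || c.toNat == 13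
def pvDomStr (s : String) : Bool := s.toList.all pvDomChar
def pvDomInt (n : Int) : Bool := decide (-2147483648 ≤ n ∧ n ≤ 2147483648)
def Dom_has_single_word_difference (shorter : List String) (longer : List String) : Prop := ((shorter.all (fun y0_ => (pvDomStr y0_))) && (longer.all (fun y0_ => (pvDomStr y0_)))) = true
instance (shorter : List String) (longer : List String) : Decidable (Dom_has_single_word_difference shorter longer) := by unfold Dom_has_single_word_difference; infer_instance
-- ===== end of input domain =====

-- B replaces A's two-pointer walk with extra_words counter by a find-first-divergence
-- scan plus one suffix comparison (objective: simpler).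


-- ===== PORT A =====
-- the while loop: state (i, j, extra_words); terminates because longer.length - j decreases
def hswdLoopA (shorter longer : List String) (i j extra : Nat) : Bool :=
  if h : i < shorter.length ∧ j < longer.length then
    if shorter[i]'h.1 = longer[j]'h.2 then
      hswdLoopA shorter longer (i + 1) (j + 1) extra
    else
      -- j += 1; extra_words += 1; if extra_words > 1: return False
      if extra + 1 > 1 then false
      else hswdLoopA shorter longer i (j + 1) (extra + 1)
  else
    (i == shorter.length && extra ≤ 1)
termination_by longer.length - j
decreasing_by all_goals omega

def has_single_word_difference (shorter : List String) (longer : List String) : Bool :=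
  if longer.length ≠ shorter.length + 1 then false
  else hswdLoopA shorter longer 0 0 0

-- ===== PORT B =====
-- the for loop over range(len(shorter)): first index k with shorter[k] != longer[k];
-- shorter[k:] / longer[k+1:] with nonnegative in-range start are List.drop (= PySem.List.slice_from)
def hswdScanB (shorter longer : List String) (k : Nat) : Bool :=
  if h : k < shorter.length then
    if shorter[k]'h ≠ longer.getD k "" then
      decide (shorter.drop k = longer.drop (k + 1))
    else hswdScanB shorter longer (k + 1)
  else true
termination_by shorter.length - k

def has_single_word_difference_alt (shorter : List String) (longer : List String) : Bool :=
  if longer.length ≠ shorter.length + 1 then false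
  else hswdScanB shorter longer 0

-- ===== PRECONDITION & SPEC =====
def Spec_has_single_word_difference (shorter : List String) (longer : List String) (out : Bool) : Prop := out = has_single_word_difference_alt shorter longer
instance (shorter : List String) (longer : List String) (out : Bool) : Decidable (Spec_has_single_word_difference shorter longer out) := by unfold Spec_has_single_word_difference; infer_instance

-- ===== CLAIM (what is proved, stated in full; the proofs are below) =====
def Claim_equal_has_single_word_difference : Prop := ∀ (shorter : List String) (longer : List String), Dom_has_single_word_difference shorter longer → Spec_has_single_word_difference shorter longer (has_single_word_difference shorter longer)

-- ===== LEMMAS AND PROOFS =====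

-- after the single allowed skip (extra = 1, j = i + 1), A's loop succeeds iff the suffixes agree
lemma hswdLoopA_one (shorter longer : List String) (i : Nat)
    (hi : i ≤ shorter.length) (hlen : longer.length = shorter.length + 1) :
    hswdLoopA shorter longer i (i + 1) 1 = decide (shorter.drop i = longer.drop (i + 1)) := by
  induction hn : shorter.length - i using Nat.strong_induction_on generalizing i with
  | _ n ih =>
    rw [hswdLoopA]
    by_cases h : i < shorter.length
    · have hj : i + 1 < longer.length := by omega
      rw [dif_pos ⟨h, hj⟩]
      by_cases heq : shorter[i]'h = longer[i + 1]'hj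
      · rw [if_pos heq, ih (shorter.length - (i + 1)) (by omega) (i + 1) (by omega) rfl,
            decide_eq_decide, List.drop_eq_getElem_cons h, List.drop_eq_getElem_cons hj, heq]
        constructor
        · intro he; rw [he]
        · intro he; exact (List.cons_eq_cons.mp he).2
      · rw [if_neg heq, if_pos (by omega)]
        have hne : ¬ (List.drop i shorter = List.drop (i + 1) longer) := by
          rw [List.drop_eq_getElem_cons h, List.drop_eq_getElem_cons hj]
          intro he; exact heq (List.cons_eq_cons.mp he).1
        simp [hne]
    · rw [dif_neg (by omega)]
      have hieq : i = shorter.length := by omega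
      subst hieq
      simp [hlen]

-- before any mismatch (i = j = k, extra = 0) the two loops agree
lemma loop_eq_scan (shorter longer : List String) (k : Nat)
    (hk : k ≤ shorter.length) (hlen : longer.length = shorter.length + 1) :
    hswdLoopA shorter longer k k 0 = hswdScanB shorter longer k := by
  induction hn : shorter.length - k using Nat.strong_induction_on generalizing k with
  | _ n ih =>
    rw [hswdLoopA, hswdScanB]
    by_cases h : k < shorter.length
    · have hj : k < longer.length := by omega
      rw [dif_pos ⟨h, hj⟩, dif_pos h]
      have hget : longer.getD k "" = longer[k]'hj := List.getD_eq_getElem _ _ hj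
      by_cases heq : shorter[k]'h = longer[k]'hj
      · rw [if_pos heq, if_neg (by rw [hget]; exact not_not_intro heq)]
        exact ih (shorter.length - (k + 1)) (by omega) (k + 1) (by omega) rfl
      · rw [if_neg heq, if_neg (by omega), if_pos (by rw [hget]; exact heq)]
        exact hswdLoopA_one shorter longer k (by omega) hlen
    · rw [dif_neg (by omega), dif_neg h]
      have : k = shorter.length := by omega
      simp [this]

-- ===== VERDICT (by name: the statement is the Claim_ definition above) =====
theorem has_single_word_difference_spec : Claim_equal_has_single_word_difference := by
  intro shorter longer _
  unfold Spec_has_single_word_difference has_single_word_difference has_single_word_difference_alt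
  by_cases hlen : longer.length = shorter.length + 1
  · rw [if_neg (by omega), if_neg (by omega)]
    exact loop_eq_scan shorter longer 0 (Nat.zero_le _) hlen
  · rw [if_pos (by omega), if_pos (by omega)]
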